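-- pv_equiv track=rewrite | github.com/dqgthb/algorithms | baekjoon/8958/main.py | solve
-- ===== SOURCE A (Python) =====
-- def solve(line):
--     line = line.strip()
--     count = 0
--     sum_ = 0
--     for c in line:
--         if c == "O":
--             count += 1
--             sum_ += count
--         else:
--             count = 0
--     return sum_
-- ===== SOURCE B (Python) =====
-- def solve(line):
--     s = line.strip()
--     total = 0
--     i = 0
--     n = len(s)
--     while i < n:
--         if s[i] != "O":
--             i += 1
--         else:
--             j = i
--             while j < n and s[j] == "O":
--                 j += 1
--             k = j - i
--             total += k * (k + 1) // 2
--             i = j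
--     return total
-- ===== Notes on version B (the rewrite author's own statement) =====
-- stated objective: alternative
-- what changed: B extracts each maximal run of the success character with a two-pointer scan and adds its score in closed form k*(k+1)//2, instead of A's per-character streak counter that increments the sum at every hit.
import Mathlib
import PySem

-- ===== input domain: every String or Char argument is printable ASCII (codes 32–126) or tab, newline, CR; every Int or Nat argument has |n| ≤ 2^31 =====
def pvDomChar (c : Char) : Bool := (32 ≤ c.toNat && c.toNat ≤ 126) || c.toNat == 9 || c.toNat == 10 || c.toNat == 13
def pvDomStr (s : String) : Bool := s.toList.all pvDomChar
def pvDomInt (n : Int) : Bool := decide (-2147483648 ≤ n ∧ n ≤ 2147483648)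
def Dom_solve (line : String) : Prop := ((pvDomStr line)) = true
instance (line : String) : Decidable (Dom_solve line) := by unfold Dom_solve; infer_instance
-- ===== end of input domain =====

-- B replaces A's per-character streak accumulator by a two-pointer scan that scores
-- each maximal success run with the closed-form triangular number k*(k+1)//2 (alternative).


-- ===== PORT A =====
-- the for-loop over the stripped line, state (count, sum_)
def pvStepA (st : Int × Int) (c : Char) : Int × Int :=
  if c == 'O' then (st.1 + 1, st.2 + (st.1 + 1)) else (0, st.2)

def solve (line : String) : Int :=
  ((PySem.Str.strip line).toList.foldl pvStepA (0, 0)).2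

-- ===== PORT B =====
-- k * (k + 1) // 2
def pvTri (k : Nat) : Int := PySem.Int.floordiv ((k : Int) * ((k : Int) + 1)) 2

-- the inner while loop: j - i = length of the maximal 'O'-run starting here
def pvLeadO : List Char → Nat
  | [] => 0
  | c :: t => if c == 'O' then pvLeadO t + 1 else 0

-- the outer while loop: advance one char past a non-'O', else jump past the run and add its triangle
def pvRuns : List Char → Int
  | [] => 0
  | c :: t =>
    if c != 'O' then pvRuns t
    else pvTri (pvLeadO t + 1) + pvRuns (t.drop (pvLeadO t))
termination_by s => s.length
decreasing_by
  all_goals simp [List.length_drop]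

def solve_alt (line : String) : Int := pvRuns (PySem.Str.strip line).toList

-- ===== PRECONDITION & SPEC =====
def Spec_solve (line : String) (out : Int) : Prop := out = solve_alt line
instance (line : String) (out : Int) : Decidable (Spec_solve line out) := by unfold Spec_solve; infer_instance

-- ===== CLAIM (what is proved, stated in full; the proofs are below) =====
def Claim_equal_solve : Prop := ∀ (line : String), Dom_solve line → Spec_solve line (solve line)

-- ===== LEMMAS AND PROOFS =====

lemma pvTri_succ (k : Nat) : pvTri (k + 1) = pvTri k + (k : Int) + 1 := by
  unfold pvTri
  rw [show (((k + 1 : Nat) : Int)) * (((k + 1 : Nat) : Int) + 1) = (((k+1)*(k+2) : Nat) : Int) by push_cast; ring,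
      show ((k : Int)) * ((k : Int) + 1) = ((k*(k+1) : Nat) : Int) by push_cast; ring,
      show (2 : Int) = ((2 : Nat) : Int) by rfl,
      PySem.Int.floordiv_natCast, PySem.Int.floordiv_natCast]
  have h : (k+1)*(k+2) = k*(k+1) + (k+1)*2 := by ring
  have : (k+1)*(k+2)/2 = k*(k+1)/2 + (k+1) := by omega
  rw [this]; push_cast; ring

-- splitting off the leading 'O'-run of any list
lemma pvRuns_split (t : List Char) :
    pvRuns t = pvTri (pvLeadO t) + pvRuns (t.drop (pvLeadO t)) := by
  cases t with
  | nil => simp [pvRuns, pvLeadO, pvTri, PySem.Int.floordiv]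
  | cons c t =>
    by_cases h : c = 'O'
    · subst h
      rw [pvRuns, pvLeadO]
      simp
    · rw [pvLeadO, if_neg (by simp [h])]
      simp [pvTri, PySem.Int.floordiv]

-- loop invariant: A's fold from run-length c adds B's run total plus c extra per leading 'O'
lemma foldA_eq (s : List Char) : ∀ (c : Nat) (acc : Int),
    (s.foldl pvStepA ((c : Int), acc)).2 = acc + pvRuns s + (c : Int) * (pvLeadO s : Int) := by
  induction s with
  | nil => intro c acc; simp [pvRuns, pvLeadO]
  | cons x t ih =>
    intro c acc
    by_cases h : x = 'O'
    · subst h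
      rw [List.foldl_cons, pvStepA, if_pos (by simp)]
      have : ((c : Int) + 1, acc + ((c : Int) + 1)) = (((c + 1 : Nat) : Int), acc + ((c : Int) + 1)) := by
        push_cast; rfl
      rw [this, ih (c + 1) (acc + ((c : Int) + 1))]
      rw [pvRuns, if_neg (by simp), pvLeadO, if_pos (by simp)]
      rw [pvRuns_split t]
      rw [pvTri_succ]
      push_cast; ring
    · rw [List.foldl_cons, pvStepA, if_neg (by simp [h])]
      have : ((0 : Int), acc) = (((0 : Nat) : Int), acc) := by norm_num
      rw [this, ih 0 acc]
      rw [pvRuns, if_pos (by simp [h]), pvLeadO, if_neg (by simp [h])]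
      push_cast; ring

-- ===== VERDICT (by name: the statement is the Claim_ definition above) =====
theorem solve_spec : Claim_equal_solve := by
  intro line _
  unfold Spec_solve solve solve_alt
  have := foldA_eq (PySem.Str.strip line).toList 0 0
  simpa using this
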